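-- pv_equiv track=rewrite | github.com/valory-xyz/mech | packages/valory/skills/task_submission_abci/behaviours.py | _update_current_delivery_report
-- ===== SOURCE A (Python) =====
-- from typing import Any, Dict, Generator, List, Optional, Set, Tuple, Type, cast
--
-- def _update_current_delivery_report(
--
--     current_usage: Dict[str, Any],
--     done_tasks: List[Dict[str, Any]],
-- ) -> Dict[str, Any]:
--     """Update the usage of the tool on IPFS."""
--     for task in done_tasks:
--         agent, tool = task["task_executor_address"], task["tool"]
--         if agent not in current_usage:
--             current_usage[agent] = {}
--         if tool not in current_usage[agent]:
--             current_usage[agent][tool] = 0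
--         current_usage[agent][tool] += 1
--     return current_usage
-- ===== SOURCE B (Python) =====
-- def _update_current_delivery_report(
--     current_usage,
--     done_tasks,
-- ):
--     """Update the usage of the tool on IPFS."""
--     # Pass 1: group the tools of the done tasks by executing agent.
--     groups = {}
--     for task in done_tasks:
--         groups.setdefault(task["task_executor_address"], []).append(task["tool"])
--     # Pass 2: tally each agent's tool list onto its existing usage entry.
--     for agent, tools in groups.items():
--         counts = dict(current_usage.get(agent, {}))
--         for tool in tools:
--             counts[tool] = counts.get(tool, 0) + 1
--         current_usage[agent] = counts
--     return current_usage
-- ===== Notes on version B (the rewrite author's own statement) =====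
-- stated objective: alternative
-- what changed: Replaces A's single pass of per-task nested increments with a two-pass group-then-tally structure: first build an index mapping each agent to the list of its tools, then for each agent tally that whole list onto a copy of its existing usage dict in one go.
import Mathlib
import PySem

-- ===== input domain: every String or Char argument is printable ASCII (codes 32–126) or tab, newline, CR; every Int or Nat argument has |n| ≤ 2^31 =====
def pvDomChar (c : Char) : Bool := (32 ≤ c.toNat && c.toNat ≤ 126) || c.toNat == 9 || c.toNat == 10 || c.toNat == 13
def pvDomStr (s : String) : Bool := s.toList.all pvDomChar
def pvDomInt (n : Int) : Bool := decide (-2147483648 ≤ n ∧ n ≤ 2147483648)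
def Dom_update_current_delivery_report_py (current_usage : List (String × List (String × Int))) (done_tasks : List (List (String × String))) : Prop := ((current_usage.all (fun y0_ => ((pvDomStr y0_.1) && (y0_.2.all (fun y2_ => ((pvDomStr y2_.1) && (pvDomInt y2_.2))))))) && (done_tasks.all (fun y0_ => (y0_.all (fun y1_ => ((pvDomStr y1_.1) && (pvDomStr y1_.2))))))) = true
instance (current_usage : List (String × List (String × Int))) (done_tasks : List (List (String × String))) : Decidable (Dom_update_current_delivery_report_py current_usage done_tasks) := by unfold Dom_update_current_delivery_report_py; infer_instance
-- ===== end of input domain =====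

-- B replaces A's one-pass per-task increments by a group-by-agent pass followed by a per-agent tally pass
-- (objective: alternative decomposition, same cost). A and B both mutate current_usage in Python; the
-- equivalence proved here is about the RETURN value.

-- ===== PORT A =====
-- one iteration of A's for-loop (literal: the two membership tests and the increment)
def pvStepA (d : PySem.Dict String (PySem.Dict String Int)) (task : List (String × String)) : PySem.Dict String (PySem.Dict String Int) :=
  let t := PySem.Dict.ofList task
  let agent := (t.get? "task_executor_address").getD ""   -- Pre_ guarantees the key is present
  let tool := (t.get? "tool").getD ""                     -- Pre_ guarantees the key is present
  let d := if d.contains agent then d else d.insert agent PySem.Dict.empty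
  let inner := d.getD agent PySem.Dict.empty
  let inner := if inner.contains tool then inner else inner.insert tool 0
  d.insert agent (inner.insert tool (inner.getD tool 0 + 1))

def update_current_delivery_report_py (current_usage : List (String × List (String × Int))) (done_tasks : List (List (String × String))) : List (String × List (String × Int)) :=
  let d := PySem.Dict.ofList (current_usage.map (fun p => (p.1, PySem.Dict.ofList p.2)))
  ((done_tasks.foldl pvStepA d).items).map (fun p => (p.1, p.2.items))

-- ===== PORT B =====
-- pass 1 of Source B: groups.setdefault(task["task_executor_address"], []).append(task["tool"])
-- (setdefault-then-append on a fresh or existing list IS Dict.modify with default [])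
def pvGroups (done_tasks : List (List (String × String))) : PySem.Dict String (List String) :=
  done_tasks.foldl (fun g task =>
    let t := PySem.Dict.ofList task
    g.modify ((t.get? "task_executor_address").getD "") [] (· ++ [(t.get? "tool").getD ""])) PySem.Dict.empty

-- inner loop of pass 2 of Source B: counts[tool] = counts.get(tool, 0) + 1 over a tool list
def pvTally (tools : List String) (counts : PySem.Dict String Int) : PySem.Dict String Int :=
  tools.foldl (fun c tool => c.insert tool (c.getD tool 0 + 1)) counts

def update_current_delivery_report_py_alt (current_usage : List (String × List (String × Int))) (done_tasks : List (List (String × String))) : List (String × List (String × Int)) :=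
  let d := PySem.Dict.ofList (current_usage.map (fun p => (p.1, PySem.Dict.ofList p.2)))
  let g := pvGroups done_tasks
  ((g.items.foldl (fun d p => d.insert p.1 (pvTally p.2 (d.getD p.1 PySem.Dict.empty))) d).items).map (fun p => (p.1, p.2.items))

-- ===== PRECONDITION & SPEC =====
-- Pre_ excludes exactly the tasks on which Python A raises KeyError: a done task missing the
-- "task_executor_address" or the "tool" key (B raises KeyError there too).
def Pre_update_current_delivery_report_py (current_usage : List (String × List (String × Int))) (done_tasks : List (List (String × String))) : Prop :=
  ∀ task ∈ done_tasks, (task.any (fun p => p.1 == "task_executor_address")) = true ∧ (task.any (fun p => p.1 == "tool")) = true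
instance (current_usage : List (String × List (String × Int))) (done_tasks : List (List (String × String))) : Decidable (Pre_update_current_delivery_report_py current_usage done_tasks) := by unfold Pre_update_current_delivery_report_py; infer_instance

def pvWitness_update_current_delivery_report_py : (List (String × List (String × Int))) × (List (List (String × String))) :=
  ([("agent1", [("tool1", 2)])], [[("task_executor_address", "agent1"), ("tool", "tool2")]])

def Spec_update_current_delivery_report_py (current_usage : List (String × List (String × Int))) (done_tasks : List (List (String × String))) (out : List (String × List (String × Int))) : Prop := out = update_current_delivery_report_py_alt current_usage done_tasks
instance (current_usage : List (String × List (String × Int))) (done_tasks : List (List (String × String))) (out : List (String × List (String × Int))) : Decidable (Spec_update_current_delivery_report_py current_usage done_tasks out) := by unfold Spec_update_current_delivery_report_py; infer_instance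

-- ===== CLAIM (what is proved, stated in full; the proofs are below) =====
def Claim_equal_update_current_delivery_report_py : Prop := ∀ (current_usage : List (String × List (String × Int))) (done_tasks : List (List (String × String))), Dom_update_current_delivery_report_py current_usage done_tasks → Pre_update_current_delivery_report_py current_usage done_tasks → Spec_update_current_delivery_report_py current_usage done_tasks (update_current_delivery_report_py current_usage done_tasks)

-- ===== LEMMAS AND PROOFS =====

def pvBump (c : PySem.Dict String Int) (tool : String) : PySem.Dict String Int := c.insert tool (c.getD tool 0 + 1)

def pvAgentOf (task : List (String × String)) : String := ((PySem.Dict.ofList task).get? "task_executor_address").getD ""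

def pvToolOf (task : List (String × String)) : String := ((PySem.Dict.ofList task).get? "tool").getD ""

theorem pv_step_core (d : PySem.Dict String (PySem.Dict String Int)) (agent tool : String) :
    (let d' := if d.contains agent then d else d.insert agent PySem.Dict.empty
     let inner := d'.getD agent PySem.Dict.empty
     let inner' := if inner.contains tool then inner else inner.insert tool 0
     d'.insert agent (inner'.insert tool (inner'.getD tool 0 + 1)))
    = d.insert agent (pvBump (d.getD agent PySem.Dict.empty) tool) := by
  simp only [pvBump]
  by_cases hc : d.contains agent
  · simp only [hc, if_true]
    by_cases ht : (d.getD agent PySem.Dict.empty).contains tool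
    · simp [ht]
    · simp only [ht, Bool.false_eq_true, if_false, PySem.Dict.getD_insert_self,
        PySem.Dict.insert_insert_self,
        PySem.Dict.getD_of_not_contains _ _ (Bool.not_eq_true _ ▸ ht)]
  · have hc' : d.contains agent = false := by simpa using hc
    simp only [hc', Bool.false_eq_true, if_false, PySem.Dict.getD_insert_self,
      PySem.Dict.contains_empty, PySem.Dict.getD_empty, PySem.Dict.insert_insert_self,
      PySem.Dict.getD_of_not_contains _ _ hc']

theorem pvStepA_eq (d : PySem.Dict String (PySem.Dict String Int)) (task : List (String × String)) :
    pvStepA d task = d.insert (pvAgentOf task) (pvBump (d.getD (pvAgentOf task) PySem.Dict.empty) (pvToolOf task)) :=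
  pv_step_core d (pvAgentOf task) (pvToolOf task)

theorem pv_getD_foldl_insert_key {κ ν β : Type} [BEq κ] [LawfulBEq κ]
    (key : β → κ) (f : ν → β → ν) (dflt : ν) :
    ∀ (l : List β) (d : PySem.Dict κ ν) (a : κ),
    (l.foldl (fun d t => d.insert (key t) (f (d.getD (key t) dflt) t)) d).getD a dflt
      = (l.filter (fun t => key t == a)).foldl f (d.getD a dflt) := by
  intro l
  induction l with
  | nil => intro d a; rfl
  | cons t l ih =>
    intro d a
    simp only [List.foldl_cons, List.filter_cons]
    by_cases h : key t = a
    · subst h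
      simp only [BEq.rfl, if_true, ih, List.foldl_cons, PySem.Dict.getD_insert_self]
    · have hb : (key t == a) = false := by simpa using h
      simp only [hb, Bool.false_eq_true, if_false, ih,
        PySem.Dict.getD_insert_of_ne _ _ _ (Ne.symm h)]

theorem pv_filter_items {κ ν : Type} [BEq κ] [LawfulBEq κ] :
    ∀ (l : List (κ × ν)) (a : κ), (l.map Prod.fst).Nodup →
    l.filter (fun p => p.1 == a) = ((PySem.Dict.mk l).get? a).elim [] (fun v => [(a, v)]) := by
  intro l
  induction l with
  | nil => intro a _; rfl
  | cons p l ih =>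
    intro a hnd
    obtain ⟨k, v⟩ := p
    simp only [List.map_cons, List.nodup_cons] at hnd
    simp only [List.filter_cons, PySem.Dict.get?_mk_cons]
    by_cases h : k = a
    · subst h
      have hrest : l.filter (fun q => q.1 == k) = [] := by
        apply List.filter_eq_nil_iff.mpr
        intro q hq hbe
        exact hnd.1 ((eq_of_beq hbe) ▸ List.mem_map_of_mem (f := Prod.fst) hq)
      simp [hrest]
    · have hb : (k == a) = false := by simpa using h
      simp only [hb, Bool.false_eq_true, if_false]
      exact ih a hnd.2

theorem pvGroups_eq (dt : List (List (String × String))) :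
    pvGroups dt = dt.foldl (fun g t => g.modify (pvAgentOf t) [] (fun v => v ++ [pvToolOf t])) PySem.Dict.empty := rfl

theorem pv_set_update_ofList {α : Type} [BEq α] [LawfulBEq α] (s : PySem.Set α) (xs : List α) :
    PySem.Set.update s (PySem.Set.ofList xs) = PySem.Set.update s xs := by
  rw [PySem.Set.update_eq_append_filter, PySem.Set.update_eq_append_filter,
    PySem.Set.ofList_eq_self_of_nodup _ (PySem.Set.nodup_ofList xs)]

theorem pvGroups_keys (dt : List (List (String × String))) :
    (pvGroups dt).keys = PySem.Set.ofList (dt.map pvAgentOf) := by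
  rw [pvGroups_eq, PySem.Dict.keys_foldl_modify_key dt pvAgentOf [] (fun _ t v => v ++ [pvToolOf t]) PySem.Dict.empty]
  simp [PySem.Set.update_nil_left]

theorem pvGroups_getD (dt : List (List (String × String))) (a : String) :
    (pvGroups dt).getD a [] = (dt.filter (fun t => pvAgentOf t == a)).map pvToolOf := by
  have h : pvGroups dt = ((dt.map (fun t => (pvAgentOf t, pvToolOf t))).foldl (fun d p => d.modify p.1 [] (fun v => v ++ [p.2])) PySem.Dict.empty) := by
    rw [List.foldl_map]; rfl
  rw [h, PySem.Dict.getD_foldl_modify_append]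
  simp [List.filter_map, Function.comp_def]

theorem pv_dicts_eq (current_usage : List (String × List (String × Int))) (dt : List (List (String × String))) :
    dt.foldl pvStepA (PySem.Dict.ofList (current_usage.map (fun p => (p.1, PySem.Dict.ofList p.2))))
    = (pvGroups dt).items.foldl (fun d p => d.insert p.1 (pvTally p.2 (d.getD p.1 PySem.Dict.empty)))
        (PySem.Dict.ofList (current_usage.map (fun p => (p.1, PySem.Dict.ofList p.2)))) := by
  set d0 := PySem.Dict.ofList (current_usage.map (fun p => (p.1, PySem.Dict.ofList p.2))) with hd0
  set g := pvGroups dt with hg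
  have hfold : List.foldl pvStepA d0 dt
      = List.foldl (fun d t => d.insert (pvAgentOf t) (pvBump (d.getD (pvAgentOf t) PySem.Dict.empty) (pvToolOf t))) d0 dt := by
    have h : pvStepA = fun d t => d.insert (pvAgentOf t) (pvBump (d.getD (pvAgentOf t) PySem.Dict.empty) (pvToolOf t)) :=
      funext fun d => funext fun t => pvStepA_eq d t
    rw [h]
  -- keys
  have hKA : (List.foldl pvStepA d0 dt).keys = PySem.Set.update d0.keys (dt.map pvAgentOf) := by
    rw [hfold]
    exact PySem.Dict.keys_foldl_insert_key dt pvAgentOf _ d0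
  have hKB : (List.foldl (fun d p => d.insert p.1 (pvTally p.2 (d.getD p.1 PySem.Dict.empty))) d0 g.items).keys
      = PySem.Set.update d0.keys (dt.map pvAgentOf) := by
    rw [PySem.Dict.keys_foldl_insert_key g.items Prod.fst (fun d p => pvTally p.2 (d.getD p.1 PySem.Dict.empty)) d0]
    have h : g.items.map Prod.fst = g.keys := rfl
    rw [h, hg, pvGroups_keys, pv_set_update_ofList]
  -- nodup keys
  have hnd0 : d0.keys.Nodup := PySem.Dict.nodup_keys_ofList _
  have hndA : (List.foldl pvStepA d0 dt).keys.Nodup := by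
    rw [hfold]; exact PySem.Dict.nodup_keys_foldl_insert_key dt pvAgentOf _ d0 hnd0
  have hndB : (List.foldl (fun d p => d.insert p.1 (pvTally p.2 (d.getD p.1 PySem.Dict.empty))) d0 g.items).keys.Nodup :=
    PySem.Dict.nodup_keys_foldl_insert_key g.items Prod.fst _ d0 hnd0
  have hndg : g.keys.Nodup := by
    rw [hg, pvGroups_keys]; exact PySem.Set.nodup_ofList _
  -- pointwise values
  have hpoint : ∀ a : String,
      (List.foldl pvStepA d0 dt).getD a PySem.Dict.empty
      = (List.foldl (fun d p => d.insert p.1 (pvTally p.2 (d.getD p.1 PySem.Dict.empty))) d0 g.items).getD a PySem.Dict.empty := by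
    intro a
    have hA : (List.foldl pvStepA d0 dt).getD a PySem.Dict.empty
        = pvTally (g.getD a []) (d0.getD a PySem.Dict.empty) := by
      rw [hfold, pv_getD_foldl_insert_key pvAgentOf (fun c t => pvBump c (pvToolOf t)) PySem.Dict.empty dt d0 a,
        hg, pvGroups_getD]
      simp only [pvTally, pvBump, List.foldl_map]
    have hB : (List.foldl (fun d p => d.insert p.1 (pvTally p.2 (d.getD p.1 PySem.Dict.empty))) d0 g.items).getD a PySem.Dict.empty
        = (g.items.filter (fun p => p.1 == a)).foldl (fun v p => pvTally p.2 v) (d0.getD a PySem.Dict.empty) :=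
      pv_getD_foldl_insert_key Prod.fst (fun v p => pvTally p.2 v) PySem.Dict.empty g.items d0 a
    have hfi : g.items.filter (fun p => p.1 == a) = ((PySem.Dict.mk g.items).get? a).elim [] (fun v => [(a, v)]) :=
      pv_filter_items g.items a hndg
    cases hget : g.get? a with
    | none =>
      have hnil : g.getD a [] = [] := by rw [PySem.Dict.getD_eq_get?_getD, hget]; rfl
      rw [hA, hnil, hB, hfi]
      simp [pvTally, hget]
    | some ts =>
      have hts : g.getD a [] = ts := by rw [PySem.Dict.getD_eq_get?_getD, hget]; rfl
      rw [hA, hts, hB, hfi]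
      simp [hget]
  -- items equality
  apply PySem.Dict.ext
  rw [PySem.Dict.items_eq_map_keys _ hndA PySem.Dict.empty,
    PySem.Dict.items_eq_map_keys _ hndB PySem.Dict.empty, hKA, ← hKB]
  exact List.map_congr_left (fun k _ => by rw [hpoint k])

-- ===== VERDICT (by name: the statement is the Claim_ definition above) =====
theorem update_current_delivery_report_py_spec : Claim_equal_update_current_delivery_report_py := by
  intro current_usage done_tasks _ _
  unfold Spec_update_current_delivery_report_py update_current_delivery_report_py update_current_delivery_report_py_alt
  simp only []
  rw [pv_dicts_eq]
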